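-- pv_equiv track=rewrite | github.com/elplatt/Exp-Net-Delib | topologies.py | get_long_path_stage_groups
-- ===== SOURCE A (Python) =====
-- def get_long_path_stage_groups(N, M, stage):
--     """Find groups for a particular stage using long-path network.
--
--     # Params
--     N: Number of participants (integer, must be > 0).
--     M: Group size (integer, must be >= 2).
--     stage: Stage of deliberation (integer, must be >= 0).
--
--     # Returns
--     A list, with each element a set of participant ids corresponding to a group.
--     Participants are given integer ids in [0, N-1].
--
--     """
--     primes = [2, 3, 5, 7, 11, 13, 17]
--     p = primes[stage]
--     partition = []
--     for j in range(p):
--         # Generate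
--         residue_class = [n for n in range(N) if n % p == j]
--         chunks = [
--             set(residue_class[k:k+M])
--             for k in range(0, len(residue_class), M)]
--         partition += chunks
--     return partition
-- ===== SOURCE B (Python) =====
-- def get_long_path_stage_groups(N, M, stage):
--     """Find groups for a particular stage using long-path network.
--
--     Closed-form: residue class j of p is [j, j+p, j+2p, ...]; generate each
--     group directly from its indices instead of scanning range(N) per residue.
--     """
--     p = [2, 3, 5, 7, 11, 13, 17][stage]
--     partition = []
--     for j in range(p):
--         size = max(0, (N - j + p - 1) // p)
--         for k in range(0, size, M):
--             partition.append({j + i * p for i in range(k, min(k + M, size))})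
--     return partition
-- ===== Notes on version B (the rewrite author's own statement) =====
-- stated objective: alternative
-- what changed: B generates each residue class and each group in closed form (size = ceil((N-j)/p), members j+i*p) instead of A's per-residue modulo filter over range(N) followed by list slicing.
import Mathlib
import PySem

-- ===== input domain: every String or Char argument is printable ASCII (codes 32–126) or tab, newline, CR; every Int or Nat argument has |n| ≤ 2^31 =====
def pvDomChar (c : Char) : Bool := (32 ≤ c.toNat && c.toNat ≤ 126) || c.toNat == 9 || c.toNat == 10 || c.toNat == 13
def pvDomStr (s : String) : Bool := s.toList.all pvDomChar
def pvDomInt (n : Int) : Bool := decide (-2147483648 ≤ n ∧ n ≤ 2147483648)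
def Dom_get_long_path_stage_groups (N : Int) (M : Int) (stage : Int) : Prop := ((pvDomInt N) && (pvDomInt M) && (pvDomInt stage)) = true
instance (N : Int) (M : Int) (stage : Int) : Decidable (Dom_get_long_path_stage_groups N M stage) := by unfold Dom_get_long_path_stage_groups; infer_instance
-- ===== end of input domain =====

-- B replaces A's per-residue modulo scan of range(N) plus slicing by closed-form generation of
-- each residue class (size = ceil((N-j)/p)) and of each group's members j+i*p (objective: alternative).

-- ===== PORT A =====
def get_long_path_stage_groups (N : Int) (M : Int) (stage : Int) : List (List Int) :=
  let primes : List Int := [2, 3, 5, 7, 11, 13, 17]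
  let p := PySem.List.pyGetD primes stage 0   -- total form: Pre_ keeps stage a valid index
  (PySem.List.pyRange 0 p 1).foldl
    (fun partition j =>
      let residue_class := (PySem.List.pyRange 0 N 1).filter (fun n => PySem.Int.mod n p == j)
      let chunks := (PySem.List.pyRange 0 ((residue_class.length : Nat) : Int) M).map
        (fun k => PySem.Set.ofList (PySem.List.slice residue_class (some k) (some (k + M))))
      partition ++ chunks)
    []

-- ===== PORT B =====
def get_long_path_stage_groups_alt (N : Int) (M : Int) (stage : Int) : List (List Int) :=
  let p := PySem.List.pyGetD [2, 3, 5, 7, 11, 13, 17] stage 0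
  (PySem.List.pyRange 0 p 1).foldl
    (fun partition j =>
      let size := max 0 (PySem.Int.floordiv (N - j + p - 1) p)
      (PySem.List.pyRange 0 size M).foldl
        (fun part k =>
          part ++ [PySem.Set.ofList
            ((PySem.List.pyRange k (min (k + M) size) 1).map (fun i => j + i * p))])
        partition)
    []

-- ===== PRECONDITION & SPEC =====
-- Pre_ excludes exactly the inputs on which the Python A raises: stage outside the valid index
-- range of the 7-element primes list (IndexError) and M = 0 (range() step 0, ValueError).
def Pre_get_long_path_stage_groups (N : Int) (M : Int) (stage : Int) : Prop :=
  (-7 ≤ stage ∧ stage < 7) ∧ M ≠ 0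
instance (N : Int) (M : Int) (stage : Int) : Decidable (Pre_get_long_path_stage_groups N M stage) := by unfold Pre_get_long_path_stage_groups; infer_instance

def pvWitness_get_long_path_stage_groups : Int × Int × Int := (5, 2, 0)

def Spec_get_long_path_stage_groups (N : Int) (M : Int) (stage : Int) (out : List (List Int)) : Prop := out = get_long_path_stage_groups_alt N M stage
instance (N : Int) (M : Int) (stage : Int) (out : List (List Int)) : Decidable (Spec_get_long_path_stage_groups N M stage out) := by unfold Spec_get_long_path_stage_groups; infer_instance

-- ===== CLAIM (what is proved, stated in full; the proofs are below) =====
def Claim_equal_get_long_path_stage_groups : Prop := ∀ (N : Int) (M : Int) (stage : Int), Dom_get_long_path_stage_groups N M stage → Pre_get_long_path_stage_groups N M stage → Spec_get_long_path_stage_groups N M stage (get_long_path_stage_groups N M stage)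

-- ===== LEMMAS AND PROOFS =====

-- range(0, S, M) with S ≥ 0 and a negative step is empty
lemma pyRange_zero_nonneg_neg_step (S M : Int) (hS : 0 ≤ S) (hM : M < 0) :
    PySem.List.pyRange 0 S M = [] := by
  simp [PySem.List.pyRange, show M ≠ 0 from hM.ne, show ¬ (0:Int) < M from not_lt.mpr hM.le,
    show ¬ S < (0:Int) from not_lt.mpr hS]

-- the residue class of j modulo p inside range(N), in closed form
lemma floordiv_val (a p q : Int) (hp : 0 < p) (h1 : q * p ≤ a) (h2 : a < (q + 1) * p) :
    PySem.Int.floordiv a p = q := (PySem.Int.floordiv_eq_iff_of_pos hp).mpr ⟨h1, h2⟩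

lemma residue_eq (p j : Int) (hp : 0 < p) (hj0 : 0 ≤ j) (hjp : j < p) (N : Int) :
    (PySem.List.pyRange 0 N 1).filter (fun n => PySem.Int.mod n p == j)
      = (PySem.List.pyRange 0 (max 0 (PySem.Int.floordiv (N - j + p - 1) p)) 1).map
          (fun i => j + i * p) := by
  induction hn : N.toNat generalizing N with
  | zero =>
    have hN : N ≤ 0 := by omega
    have hc : PySem.Int.floordiv (N - j + p - 1) p = PySem.Int.floordiv (N - j + p - 1) p := rfl
    have hle : PySem.Int.floordiv (N - j + p - 1) p ≤ 0 := by
      by_contra h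
      push Not at h
      have h1 := (PySem.Int.floordiv_eq_iff_of_pos (a := N - j + p - 1)
        (q := PySem.Int.floordiv (N - j + p - 1) p) hp).mp rfl
      nlinarith [h1.1, h1.2]
    rw [PySem.List.pyRange_one_eq_nil hN, show max 0 (PySem.Int.floordiv (N - j + p - 1) p) = 0 by omega,
        PySem.List.pyRange_one_eq_nil (le_refl (0 : Int))]
    rfl
  | succ n ih =>
    have hN : 0 < N := by omega
    obtain hq := PySem.Int.floordiv_mul_add_mod (N - 1) p
    obtain hr0 := PySem.Int.mod_nonneg (N - 1) hp
    obtain hrp := PySem.Int.mod_lt (N - 1) hp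
    set q := PySem.Int.floordiv (N - 1) p with hqdef
    set r := PySem.Int.mod (N - 1) p with hrdef
    have hq0 : 0 ≤ q := by nlinarith
    rw [show N = (N - 1) + 1 from by ring, PySem.List.pyRange_one_succ_right (by omega),
        List.filter_append, ih (N - 1) (by omega)]
    by_cases hr : r = j
    · have hc' : PySem.Int.floordiv (N - 1 - j + p - 1) p = q :=
        floordiv_val _ _ _ hp (by linarith) (by linarith)
      have hc : PySem.Int.floordiv (N - 1 + 1 - j + p - 1) p = q + 1 :=
        floordiv_val _ _ _ hp (by linarith) (by linarith)
      rw [hc, hc', show max 0 (q + 1) = q + 1 by omega, show max 0 q = q by omega,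
          PySem.List.pyRange_one_succ_right hq0, List.map_append]
      congr 1
      have : (PySem.Int.mod (N - 1) p == j) = true := by
        rw [← hrdef, hr]
        exact beq_self_eq_true j
      simp only [List.filter_cons, List.filter_nil, this, if_true, List.map_cons, List.map_nil]
      congr 1
      linarith
    · have e1 : PySem.Int.floordiv (N - 1 - j + p - 1) p = q + (if j < r then 1 else 0) := by
        split_ifs with h
        · exact floordiv_val _ _ _ hp (by linarith) (by linarith)
        · have hrj : r < j := by omega
          exact floordiv_val _ _ _ hp (by linarith) (by linarith)
      have e2 : PySem.Int.floordiv (N - 1 + 1 - j + p - 1) p = q + (if j < r then 1 else 0) := by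
        split_ifs with h
        · exact floordiv_val _ _ _ hp (by linarith) (by linarith)
        · have hrj : r < j := by omega
          exact floordiv_val _ _ _ hp (by linarith) (by linarith)
      have : (PySem.Int.mod (N - 1) p == j) = false := by
        rw [← hrdef]
        exact beq_eq_false_iff_ne.mpr hr
      simp only [List.filter_cons, List.filter_nil, this, if_false, List.append_nil, e1, e2,
        Bool.false_eq_true]

-- A's slice-of-residue-class chunk equals B's closed-form chunk, over the same k's
lemma chunks_eq (g : Int → Int) (S M : Int) (hS : 0 ≤ S) (hM : M ≠ 0) :
    (PySem.List.pyRange 0 ((((PySem.List.pyRange 0 S 1).map g).length : Nat) : Int) M).map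
        (fun k => PySem.Set.ofList
          (PySem.List.slice ((PySem.List.pyRange 0 S 1).map g) (some k) (some (k + M))))
      = (PySem.List.pyRange 0 S M).map
          (fun k => PySem.Set.ofList ((PySem.List.pyRange k (min (k + M) S) 1).map g)) := by
  have hlen : ((((PySem.List.pyRange 0 S 1).map g).length : Nat) : Int) = S := by
    simp [PySem.List.length_pyRange_one]
    omega
  rw [hlen]
  rcases lt_or_gt_of_ne hM with hneg | hpos
  · rw [pyRange_zero_nonneg_neg_step S M hS hneg]
    rfl
  · apply List.map_congr_left
    intro k hk
    rw [PySem.List.mem_pyRange_iff_of_pos hpos] at hk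
    obtain ⟨hk0, hkS, -⟩ := hk
    congr 1
    rw [PySem.List.slice_toNat _ hk0 (by omega)]
    apply List.ext_getElem
    · simp [PySem.List.length_pyRange_one]
      omega
    · intro i h1 h2
      simp only [List.getElem_take, List.getElem_drop, List.getElem_map,
        PySem.List.getElem_pyRange_one]
      congr 1
      push_cast
      omega

-- ===== VERDICT (by name: the statement is the Claim_ definition above) =====
theorem get_long_path_stage_groups_spec : Claim_equal_get_long_path_stage_groups := by
  intro N M stage _ hpre
  obtain ⟨⟨hs1, hs2⟩, hM⟩ := hpre
  unfold Spec_get_long_path_stage_groups get_long_path_stage_groups get_long_path_stage_groups_alt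
  have hp : 0 < PySem.List.pyGetD ([2, 3, 5, 7, 11, 13, 17] : List Int) stage 0 := by
    interval_cases stage <;> decide
  apply PySem.List.foldl_congr_mem
  intro acc j hj
  rw [PySem.List.mem_pyRange_one] at hj
  show acc ++ _ = _
  rw [PySem.List.foldl_append_singleton_eq_map]
  congr 1
  rw [residue_eq _ j hp hj.1 hj.2]
  exact chunks_eq _ _ M (le_max_left _ _) hM
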